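-- pv_equiv track=rewrite | github.com/dynos-fit/autofix | benchmarks/agent_efficiency/adapters/autofix_standalone.py | _in_scope
-- ===== SOURCE A (Python) =====
-- def _in_scope(path: str, patterns: list[str]) -> bool:
--     normalized = path.strip("/")
--     for pattern in patterns:
--         candidate = str(pattern or "").strip("/")
--         if not candidate:
--             continue
--         if normalized == candidate or normalized.startswith(candidate + "/"):
--             return True
--     return False
-- ===== SOURCE B (Python) =====
-- def _in_scope(path: str, patterns: list[str]) -> bool:
--     normalized = path.strip("/")
--     prefixes = set()
--     acc = ""
--     for ch in normalized:
--         if ch == "/":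
--             prefixes.add(acc)
--         acc += ch
--     if normalized:
--         prefixes.add(normalized)
--     for pattern in patterns:
--         candidate = str(pattern or "").strip("/")
--         if candidate and candidate in prefixes:
--             return True
--     return False
-- ===== Notes on version B (the rewrite author's own statement) =====
-- stated objective: alternative
-- what changed: B precomputes the set of boundary prefixes of the normalized path in one scan and tests each normalized pattern by set membership, instead of A's per-pattern equality/startswith string scans.
import Mathlib
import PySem

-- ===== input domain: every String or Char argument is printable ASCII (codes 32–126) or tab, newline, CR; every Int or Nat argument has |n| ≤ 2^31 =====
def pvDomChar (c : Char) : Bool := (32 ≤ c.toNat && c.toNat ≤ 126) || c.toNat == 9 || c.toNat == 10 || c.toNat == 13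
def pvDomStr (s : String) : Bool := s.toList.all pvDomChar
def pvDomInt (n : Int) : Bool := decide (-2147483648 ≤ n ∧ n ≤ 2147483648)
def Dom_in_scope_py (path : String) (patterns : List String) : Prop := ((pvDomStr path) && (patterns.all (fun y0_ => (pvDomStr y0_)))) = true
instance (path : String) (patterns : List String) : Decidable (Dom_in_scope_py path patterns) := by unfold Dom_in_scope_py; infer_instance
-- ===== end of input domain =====

-- B replaces A's per-pattern equality/startswith scans by one precomputed set of
-- boundary prefixes of the normalized path, tested by membership (alternative decomposition).

-- ===== PORT A =====
-- the for-loop over patterns with early return / continue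
def inScopeLoopA (normalized : List Char) : List String → Bool
  | [] => false
  | pattern :: rest =>
    let candidate := PySem.Chars.stripChars (if pattern.toList = [] then [] else pattern.toList) ['/']
    if candidate = [] then inScopeLoopA normalized rest
    else if (normalized = candidate) ∨ PySem.Chars.startswith normalized (candidate ++ ['/']) = true then true
    else inScopeLoopA normalized rest

def in_scope_py (path : String) (patterns : List String) : Bool :=
  inScopeLoopA (PySem.Chars.stripChars path.toList ['/']) patterns

-- ===== PORT B =====
-- the single scan of `normalized` collecting the prefix before each '/'
def inScopeCollect (normalized : List Char) : PySem.Set (List Char) × List Char :=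
  normalized.foldl
    (fun st ch => ((if ch = '/' then PySem.Set.add st.1 st.2 else st.1), st.2 ++ [ch]))
    (PySem.Set.empty, [])

def inScopePrefixes (normalized : List Char) : PySem.Set (List Char) :=
  let pfx := (inScopeCollect normalized).1
  if normalized ≠ [] then PySem.Set.add pfx normalized else pfx

def in_scope_py_alt (path : String) (patterns : List String) : Bool :=
  let normalized := PySem.Chars.stripChars path.toList ['/']
  let prefixes := inScopePrefixes normalized
  patterns.any (fun pattern =>
    let candidate := PySem.Chars.stripChars (if pattern.toList = [] then [] else pattern.toList) ['/']
    candidate ≠ [] && PySem.Set.contains prefixes candidate)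

-- ===== PRECONDITION & SPEC =====
def Spec_in_scope_py (path : String) (patterns : List String) (out : Bool) : Prop := out = in_scope_py_alt path patterns
instance (path : String) (patterns : List String) (out : Bool) : Decidable (Spec_in_scope_py path patterns out) := by unfold Spec_in_scope_py; infer_instance

-- ===== CLAIM (what is proved, stated in full; the proofs are below) =====
def Claim_equal_in_scope_py : Prop := ∀ (path : String) (patterns : List String), Dom_in_scope_py path patterns → Spec_in_scope_py path patterns (in_scope_py path patterns)

-- ===== LEMMAS AND PROOFS =====

-- membership in the set built by the fold
theorem mem_collect (x : List Char) : ∀ (n : List Char) (S : PySem.Set (List Char)) (a : List Char),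
    x ∈ (n.foldl (fun st ch => ((if ch = '/' then PySem.Set.add st.1 st.2 else st.1), st.2 ++ [ch])) (S, a)).1
      ↔ x ∈ S ∨ ∃ u v, n = u ++ '/' :: v ∧ x = a ++ u := by
  intro n
  induction n with
  | nil =>
    intro S a
    simp
  | cons ch t ih =>
    intro S a
    rw [List.foldl_cons, ih]
    constructor
    · rintro (hS | ⟨u, v, ht, hx⟩)
      · by_cases hch : ch = '/'
        · simp only [hch] at hS
          rcases (PySem.Set.mem_add _ _ _).mp hS with h | h
          · exact Or.inl h
          · exact Or.inr ⟨[], t, by simp [hch], by simp [h]⟩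
        · simp only [if_neg hch] at hS
          exact Or.inl hS
      · exact Or.inr ⟨ch :: u, v, by simp [ht], by simp [hx]⟩
    · rintro (hS | ⟨u, v, ht, hx⟩)
      · left
        by_cases hch : ch = '/'
        · simp only [hch]
          exact (PySem.Set.mem_add _ _ _).mpr (Or.inl hS)
        · simpa [if_neg hch] using hS
      · cases u with
        | nil =>
          simp at ht hx
          left
          have hch : ch = '/' := ht.1
          simp only [hch]
          exact (PySem.Set.mem_add _ _ _).mpr (Or.inr hx)
        | cons c' u' =>
          simp only [List.cons_append, List.cons.injEq] at ht
          right
          exact ⟨u', v, ht.2, by simp [hx, ht.1]⟩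

theorem mem_prefixes (x n : List Char) :
    x ∈ inScopePrefixes n ↔ (n ≠ [] ∧ x = n) ∨ ∃ u v, n = u ++ '/' :: v ∧ x = u := by
  unfold inScopePrefixes inScopeCollect
  by_cases hn : n = []
  · subst hn; simp [PySem.Set.empty]
  · simp only [if_pos (by exact hn : n ≠ [])]
    rw [PySem.Set.mem_add, mem_collect]
    simp [PySem.Set.empty, hn]
    tauto

-- the per-pattern condition of A coincides with B's membership test
theorem cond_iff (n c : List Char) (hc : c ≠ []) :
    ((n = c) ∨ PySem.Chars.startswith n (c ++ ['/']) = true) ↔ c ∈ inScopePrefixes n := by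
  rw [mem_prefixes, PySem.Chars.startswith_iff]
  constructor
  · rintro (rfl | hpre)
    · exact Or.inl ⟨hc, rfl⟩
    · rcases hpre with ⟨t, ht⟩
      exact Or.inr ⟨c, t, by simp [← ht], rfl⟩
  · rintro (⟨_, rfl⟩ | ⟨u, v, hn, rfl⟩)
    · exact Or.inl rfl
    · exact Or.inr ⟨v, by simp [hn]⟩

theorem loop_eq_any (n : List Char) (patterns : List String) :
    inScopeLoopA n patterns
      = patterns.any (fun pattern =>
          let candidate := PySem.Chars.stripChars (if pattern.toList = [] then [] else pattern.toList) ['/']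
          candidate ≠ [] && PySem.Set.contains (inScopePrefixes n) candidate) := by
  induction patterns with
  | nil => rfl
  | cons p rest ih =>
    rw [List.any_cons, ← ih]
    have hstep : inScopeLoopA n (p :: rest)
        = (if (PySem.Chars.stripChars (if p.toList = [] then [] else p.toList) ['/']) = []
           then inScopeLoopA n rest
           else if (n = PySem.Chars.stripChars (if p.toList = [] then [] else p.toList) ['/'])
                    ∨ PySem.Chars.startswith n ((PySem.Chars.stripChars (if p.toList = [] then [] else p.toList) ['/']) ++ ['/']) = true
                then true
             else inScopeLoopA n rest) := rfl
    rw [hstep]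
    set c := PySem.Chars.stripChars (if p.toList = [] then [] else p.toList) ['/'] with hc
    by_cases hce : c = []
    · simp [hce]
    · simp only [if_neg hce]
      by_cases hcond : (n = c) ∨ PySem.Chars.startswith n (c ++ ['/']) = true
      · simp only [hcond, if_pos, Bool.true_eq]
        simp
        exact Or.inl ⟨hce, (cond_iff n c hce).mp hcond⟩
      · have hmem : c ∉ inScopePrefixes n := fun h => hcond ((cond_iff n c hce).mpr h)
        simp [hcond]
        exact fun _ h => absurd h hmem

-- ===== VERDICT (by name: the statement is the Claim_ definition above) =====
theorem in_scope_py_spec : Claim_equal_in_scope_py := by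
  intro path patterns _
  unfold Spec_in_scope_py in_scope_py in_scope_py_alt
  exact loop_eq_any _ patterns
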